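-- pv_equiv track=rewrite | github.com/EvolvingAgentsLabs/llmos | lib/microqiskit.py | _cancel_inverse_gates
-- ===== SOURCE A (Python) =====
-- def _cancel_inverse_gates(gates):
--     """Remove pairs of inverse gates (H·H = I, X·X = I, etc.)"""
--     result = []
--     skip_next = set()
--
--     for i, gate in enumerate(gates):
--         if i in skip_next:
--             continue
--
--         # Look for cancellation with next gate
--         if i + 1 < len(gates):
--             next_gate = gates[i + 1]
--
--             # H·H cancellation
--             if gate[0] == 'h' and next_gate[0] == 'h' and gate[1] == next_gate[1]:
--                 skip_next.add(i + 1)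
--                 continue
--
--             # X·X cancellation
--             if gate[0] == 'x' and next_gate[0] == 'x' and gate[1] == next_gate[1]:
--                 skip_next.add(i + 1)
--                 continue
--
--         result.append(gate)
--
--     return result
-- ===== SOURCE B (Python) =====
-- def _cancel_inverse_gates(gates):
--     """Remove pairs of inverse gates (H·H = I, X·X = I, etc.)"""
--     result = []
--     prev = None
--     for gate in gates:
--         if prev is not None and prev[0] == gate[0] and prev[0] in ('h', 'x') and prev[1] == gate[1]:
--             prev = None
--         elif prev is None:
--             prev = gate
--         else:
--             result.append(prev)
--             prev = gate
--     if prev is not None: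
--         result.append(prev)
--     return result
-- ===== Notes on version B (the rewrite author's own statement) =====
-- stated objective: simpler
-- what changed: Replaced the index-and-skip-set scan (enumerate, skip_next set, gates[i+1] lookahead) by a single pass holding one pending gate that is emitted or cancelled against the incoming gate, with no index arithmetic or set.
import Mathlib
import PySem

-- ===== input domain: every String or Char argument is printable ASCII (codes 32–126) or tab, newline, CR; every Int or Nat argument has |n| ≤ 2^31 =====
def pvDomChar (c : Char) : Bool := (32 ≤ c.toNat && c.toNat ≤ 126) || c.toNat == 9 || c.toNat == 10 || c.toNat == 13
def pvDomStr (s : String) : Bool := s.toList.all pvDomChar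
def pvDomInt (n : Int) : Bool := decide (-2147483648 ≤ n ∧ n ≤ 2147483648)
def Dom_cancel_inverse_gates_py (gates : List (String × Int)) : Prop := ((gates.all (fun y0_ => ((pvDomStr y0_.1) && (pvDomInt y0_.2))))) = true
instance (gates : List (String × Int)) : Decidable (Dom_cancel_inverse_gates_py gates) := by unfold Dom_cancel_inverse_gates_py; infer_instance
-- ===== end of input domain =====

-- B replaces A's index-and-skip-set scan by a single pass holding one pending gate (objective: simpler).

-- ===== PORT A =====
-- literal transliteration of A: result list + skip_next set, loop over enumerate(gates),
-- lookahead gates[i+1] via pyGet? (Python never raises here since 0 ≤ i+1 < len is checked)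
def pvAStep (gates : List (String × Int))
    (st : List (String × Int) × PySem.Set Int) (p : Int × (String × Int)) :
    List (String × Int) × PySem.Set Int :=
  if PySem.Set.contains st.2 p.1 then st
  else if p.1 + 1 < (gates.length : Int) then
    match PySem.List.pyGet? gates (p.1 + 1) with
    | some next_gate =>
      if p.2.1 == "h" && next_gate.1 == "h" && p.2.2 == next_gate.2 then
        (st.1, PySem.Set.add st.2 (p.1 + 1))
      else if p.2.1 == "x" && next_gate.1 == "x" && p.2.2 == next_gate.2 then
        (st.1, PySem.Set.add st.2 (p.1 + 1))
      else (st.1 ++ [p.2], st.2)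
    | none => (st.1 ++ [p.2], st.2)   -- unreachable: 0 ≤ i+1 < len(gates)
  else (st.1 ++ [p.2], st.2)

def cancel_inverse_gates_py (gates : List (String × Int)) : List (String × Int) :=
  ((PySem.List.enumerate gates 0).foldl (pvAStep gates) ([], PySem.Set.empty)).1

-- ===== PORT B =====
-- literal transliteration of B: fold carrying (result, prev); flush prev at the end
def pvBStep (st : List (String × Int) × Option (String × Int)) (gate : String × Int) :
    List (String × Int) × Option (String × Int) :=
  match st.2 with
  | some prev =>
    if prev.1 == gate.1 && (prev.1 == "h" || prev.1 == "x") && prev.2 == gate.2 then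
      (st.1, none)
    else (st.1 ++ [prev], some gate)
  | none => (st.1, some gate)

def cancel_inverse_gates_py_alt (gates : List (String × Int)) : List (String × Int) :=
  let st := gates.foldl pvBStep ([], none)
  match st.2 with
  | some prev => st.1 ++ [prev]
  | none => st.1

-- ===== PRECONDITION & SPEC =====
def Spec_cancel_inverse_gates_py (gates : List (String × Int)) (out : List (String × Int)) : Prop := out = cancel_inverse_gates_py_alt gates
instance (gates : List (String × Int)) (out : List (String × Int)) : Decidable (Spec_cancel_inverse_gates_py gates out) := by unfold Spec_cancel_inverse_gates_py; infer_instance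

-- ===== CLAIM (what is proved, stated in full; the proofs are below) =====
def Claim_equal_cancel_inverse_gates_py : Prop := ∀ (gates : List (String × Int)), Dom_cancel_inverse_gates_py gates → Spec_cancel_inverse_gates_py gates (cancel_inverse_gates_py gates)

-- ===== LEMMAS AND PROOFS =====

-- reference recursion: non-cascading left-to-right adjacent cancellation
def pvCanc (g1 g2 : String × Int) : Bool :=
  (g1.1 == "h" && g2.1 == "h" && g1.2 == g2.2) || (g1.1 == "x" && g2.1 == "x" && g1.2 == g2.2)

def pvF : List (String × Int) → List (String × Int)
  | [] => []
  | [g] => [g]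
  | g1 :: g2 :: rest => if pvCanc g1 g2 then pvF rest else g1 :: pvF (g2 :: rest)

theorem pvA_loop (gates : List (String × Int)) :
    ∀ (m : Nat) (rest : List (String × Int)) (n : Nat) (skip : PySem.Set Int)
      (acc : List (String × Int)),
      rest.length = m → rest = gates.drop n → (∀ j ∈ skip, j < (n : Int)) →
      ((PySem.List.enumerate rest (n : Int)).foldl (pvAStep gates) (acc, skip)).1
        = acc ++ pvF rest := by
  intro m
  induction m using Nat.strong_induction_on with
  | _ m ih =>
    intro rest n skip acc hm hdrop hskip
    match rest, hm with
    | [], _ => simp [PySem.List.enumerate_nil, pvF]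
    | g :: rest', hm =>
      have hn : n < gates.length := by
        by_contra h
        simp [List.drop_eq_nil_of_le (Nat.le_of_not_lt h)] at hdrop
      have hlen : gates.length - n = rest'.length + 1 := by
        have := congrArg List.length hdrop
        simp at this; omega
      have hnoskip : PySem.Set.contains skip (n : Int) = false := by
        rw [Bool.eq_false_iff]
        intro h
        exact absurd (hskip _ ((PySem.Set.contains_iff _ _).mp h)) (lt_irrefl _)
      rw [PySem.List.enumerate_cons, List.foldl_cons]
      match rest' with
      | [] =>
        -- last gate: i + 1 < len is false
        have hlt : ¬ ((n : Int) + 1 < (gates.length : Int)) := by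
          simp at hlen; omega
        simp only [pvAStep, hnoskip, Bool.false_eq_true, if_false, hlt]
        simp [PySem.List.enumerate_nil, pvF]
      | g2 :: rest'' =>
        have hlt : ((n : Int) + 1 < (gates.length : Int)) := by
          simp at hlen; omega
        have hd1 : gates.drop (n + 1) = g2 :: rest'' := by
          have := congrArg (List.drop 1) hdrop
          simp [List.drop_drop] at this
          exact this.symm
        have hget : PySem.List.pyGet? gates ((n : Int) + 1) = some g2 := by
          have h1 : ((n : Int) + 1) = ((n + 1 : Nat) : Int) := by omega
          rw [h1, PySem.List.pyGet?_natCast]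
          have h0 : gates[n + 1]? = (gates.drop (n + 1))[0]? := by
            rw [List.getElem?_drop]
          rw [h0, hd1]
          rfl
        simp only [pvAStep, hnoskip, Bool.false_eq_true, if_false, hlt, if_true, hget]
        by_cases hc : pvCanc g g2 = true
        · -- cancellation: skip i+1, it is consumed by the next enumerate step
          have hdrop2 : rest'' = gates.drop (n + 2) := by
            have := congrArg (List.drop 2) hdrop
            simpa [List.drop_drop, Nat.add_comm] using this
          have hstep : (if g.1 == "h" && g2.1 == "h" && g.2 == g2.2 then
                (acc, PySem.Set.add skip ((n : Int) + 1))
              else if g.1 == "x" && g2.1 == "x" && g.2 == g2.2 then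
                (acc, PySem.Set.add skip ((n : Int) + 1))
              else (acc ++ [g], skip)) = (acc, PySem.Set.add skip ((n : Int) + 1)) := by
            unfold pvCanc at hc
            rcases Bool.or_eq_true_iff.mp hc with h | h
            · simp [h]
            · by_cases h' : (g.1 == "h" && g2.1 == "h" && g.2 == g2.2) = true <;> simp [h', h]
          rw [hstep]
          rw [PySem.List.enumerate_cons, List.foldl_cons]
          have hmem2 : PySem.Set.contains (PySem.Set.add skip ((n : Int) + 1)) ((n : Int) + 1) = true := by
            have : ((n : Int) + 1) ∈ PySem.Set.add skip ((n : Int) + 1) :=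
              (PySem.Set.mem_add _ _ _).mpr (Or.inr rfl)
            exact (PySem.Set.contains_iff _ _).mpr this
          simp only [pvAStep, hmem2, if_true]
          have heq : ((n : Int) + 1 + 1) = ((n + 2 : Nat) : Int) := by omega
          rw [heq]
          have := ih rest''.length (by simp at hm ⊢; omega) rest'' (n + 2)
            (PySem.Set.add skip ((n : Int) + 1)) acc rfl hdrop2
            (by intro j hj
                rcases (PySem.Set.mem_add _ _ _).mp hj with h | h
                · have := hskip j h; push_cast; omega
                · subst h; push_cast; omega)
          rw [this]
          simp [pvF, hc]
        · -- no cancellation: emit g, continue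
          have hstep : (if g.1 == "h" && g2.1 == "h" && g.2 == g2.2 then
                (acc, PySem.Set.add skip ((n : Int) + 1))
              else if g.1 == "x" && g2.1 == "x" && g.2 == g2.2 then
                (acc, PySem.Set.add skip ((n : Int) + 1))
              else (acc ++ [g], skip)) = (acc ++ [g], skip) := by
            unfold pvCanc at hc
            simp only [Bool.or_eq_true_iff, not_or] at hc
            simp [hc.1, hc.2]
          rw [hstep]
          have hdrop1 : g2 :: rest'' = gates.drop (n + 1) := by
            have := congrArg (List.drop 1) hdrop
            simpa [List.drop_drop, Nat.add_comm] using this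
          have heq : ((n : Int) + 1) = ((n + 1 : Nat) : Int) := by omega
          rw [heq]
          have := ih (g2 :: rest'').length (by simp at hm ⊢; omega) (g2 :: rest'') (n + 1)
            skip (acc ++ [g]) rfl hdrop1
            (by intro j hj; have := hskip j hj; push_cast; omega)
          rw [this]
          simp [pvF, hc]

-- B's cancel test equals pvCanc
theorem pvBcond_eq (p g : String × Int) :
    (p.1 == g.1 && (p.1 == "h" || p.1 == "x") && p.2 == g.2) = pvCanc p g := by
  rw [Bool.eq_iff_iff]
  unfold pvCanc
  simp only [Bool.and_eq_true, Bool.or_eq_true, beq_iff_eq]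
  constructor
  · intro h
    aesop
  · intro h
    aesop

theorem pvB_loop :
    ∀ (rest : List (String × Int)),
      (∀ (acc : List (String × Int)),
        (match (rest.foldl pvBStep (acc, none)).2 with
         | some prev => (rest.foldl pvBStep (acc, none)).1 ++ [prev]
         | none => (rest.foldl pvBStep (acc, none)).1) = acc ++ pvF rest) ∧
      (∀ (acc : List (String × Int)) (p : String × Int),
        (match (rest.foldl pvBStep (acc, some p)).2 with
         | some prev => (rest.foldl pvBStep (acc, some p)).1 ++ [prev]
         | none => (rest.foldl pvBStep (acc, some p)).1) = acc ++ pvF (p :: rest)) := by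
  intro rest
  induction rest with
  | nil => constructor <;> intros <;> simp [pvF]
  | cons g rest' ih =>
    constructor
    · intro acc
      rw [List.foldl_cons]
      show (match (rest'.foldl pvBStep (pvBStep (acc, none) g)).2 with
            | some prev => (rest'.foldl pvBStep (pvBStep (acc, none) g)).1 ++ [prev]
            | none => (rest'.foldl pvBStep (pvBStep (acc, none) g)).1) = acc ++ pvF (g :: rest')
      have hstep : pvBStep (acc, none) g = (acc, some g) := by simp [pvBStep]
      rw [hstep]
      exact ih.2 acc g
    · intro acc p
      rw [List.foldl_cons]
      by_cases hc : pvCanc p g = true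
      · have hstep : pvBStep (acc, some p) g = (acc, none) := by
          simp only [pvBStep]
          rw [pvBcond_eq, hc]
          simp
        rw [hstep, ih.1 acc]
        simp [pvF, hc]
      · have hstep : pvBStep (acc, some p) g = (acc ++ [p], some g) := by
          simp only [pvBStep]
          rw [pvBcond_eq]
          simp [hc]
        rw [hstep, ih.2 (acc ++ [p]) g]
        simp [pvF, hc]

theorem pvA_eq_pvF (gates : List (String × Int)) :
    cancel_inverse_gates_py gates = pvF gates := by
  unfold cancel_inverse_gates_py
  have := pvA_loop gates gates.length gates 0 PySem.Set.empty [] rfl rfl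
    (by intro j hj; simp [PySem.Set.empty] at hj)
  simpa using this

theorem pvB_eq_pvF (gates : List (String × Int)) :
    cancel_inverse_gates_py_alt gates = pvF gates := by
  unfold cancel_inverse_gates_py_alt
  have := (pvB_loop gates).1 []
  simpa using this

-- ===== VERDICT (by name: the statement is the Claim_ definition above) =====
theorem cancel_inverse_gates_py_spec : Claim_equal_cancel_inverse_gates_py := by
  intro gates _
  unfold Spec_cancel_inverse_gates_py
  rw [pvA_eq_pvF, pvB_eq_pvF]
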